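-- pv_equiv track=rewrite | github.com/Ingenious-c0der/University_Assignments | Comp_Prog/monsters.py | solve
-- ===== SOURCE A (Python) =====
-- def solve(N,M,A,B,C):
--     total_coins_per_hero = [ ]
--     for i in range(N):
--         total_coins_per_hero.append(0)
--     for i in range(N):
--         for j in range(M):
--             if A[i] >= B[j]:
--                 total_coins_per_hero[i] += C[j]
--     return total_coins_per_hero
-- ===== SOURCE B (Python) =====
-- def solve(N, M, A, B, C):
--     # Sort monsters by strength, prefix-sum their coins, then binary-search per hero.
--     monsters = sorted(((B[j], C[j]) for j in range(M)), key=lambda m: m[0])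
--     bs = [m[0] for m in monsters]
--     prefix = [0]
--     t = 0
--     for m in monsters:
--         t += m[1]
--         prefix.append(t)
--     res = []
--     for i in range(N):
--         a = A[i]
--         lo, hi = 0, len(bs)
--         while lo < hi:
--             mid = (lo + hi) // 2
--             if bs[mid] <= a:
--                 lo = mid + 1
--             else:
--                 hi = mid
--         res.append(prefix[lo])
--     return res
-- ===== Notes on version B (the rewrite author's own statement) =====
-- stated objective: faster
-- what changed: Replaced the N*M nested scan by sorting monsters by strength with prefix sums of coins and a binary search per hero.
-- outside the precondition, e.g. on solve(0, 1, [], [], []): A returns [], B raises IndexError; on solve(1, 1, [0], [5], []): A returns [0], B raises IndexError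
import Mathlib
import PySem

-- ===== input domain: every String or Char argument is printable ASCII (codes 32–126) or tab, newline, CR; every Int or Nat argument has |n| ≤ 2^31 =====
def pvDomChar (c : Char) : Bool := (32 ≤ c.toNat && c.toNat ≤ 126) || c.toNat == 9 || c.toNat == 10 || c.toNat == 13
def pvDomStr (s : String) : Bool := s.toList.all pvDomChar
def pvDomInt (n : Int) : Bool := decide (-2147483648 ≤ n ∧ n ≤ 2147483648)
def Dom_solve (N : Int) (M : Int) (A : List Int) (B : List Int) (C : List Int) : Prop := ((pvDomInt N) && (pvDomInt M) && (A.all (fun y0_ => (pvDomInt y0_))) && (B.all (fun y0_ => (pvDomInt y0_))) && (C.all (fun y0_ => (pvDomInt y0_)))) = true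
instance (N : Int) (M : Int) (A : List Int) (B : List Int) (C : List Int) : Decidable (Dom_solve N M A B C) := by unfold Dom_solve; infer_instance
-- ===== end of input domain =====

-- B replaces A's O(N*M) nested scan by sorting monsters by strength, prefix sums of coins,
-- and a binary search per hero (asymptotically faster); equivalence of return values is proved on Pre_solve.

-- ===== PORT A =====
def solve (N : Int) (M : Int) (A : List Int) (B : List Int) (C : List Int) : List Int :=
  let total := (PySem.List.pyRange 0 N 1).foldl (fun acc _ => acc ++ [(0 : Int)]) []
  (PySem.List.pyRange 0 N 1).foldl (fun tot i =>
    (PySem.List.pyRange 0 M 1).foldl (fun t j =>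
      if (PySem.List.pyGet? A i).getD 0 ≥ (PySem.List.pyGet? B j).getD 0 then
        t.set i.toNat ((PySem.List.pyGet? t i).getD 0 + (PySem.List.pyGet? C j).getD 0)
      else t) tot) total

-- ===== PORT B =====
-- the while-loop of Source B: binary search for the number of sorted strengths ≤ a.
-- Structural recursion on the loop's measure (hi - lo), supplied as sufficient fuel.
def solveAltCountGo (bs : List Int) (a : Int) : Nat → Int → Int → Int
  | 0, lo, _ => lo
  | fuel + 1, lo, hi =>
    if lo < hi then
      if (PySem.List.pyGet? bs (PySem.Int.floordiv (lo + hi) 2)).getD 0 ≤ a then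
        solveAltCountGo bs a fuel (PySem.Int.floordiv (lo + hi) 2 + 1) hi
      else
        solveAltCountGo bs a fuel lo (PySem.Int.floordiv (lo + hi) 2)
    else lo

def solveAltCount (bs : List Int) (a : Int) (lo hi : Int) : Int :=
  solveAltCountGo bs a (hi - lo).toNat lo hi

def solve_alt (N : Int) (M : Int) (A : List Int) (B : List Int) (C : List Int) : List Int :=
  let monsters := PySem.List.sorted
    ((PySem.List.pyRange 0 M 1).map
      (fun j => ((PySem.List.pyGet? B j).getD 0, (PySem.List.pyGet? C j).getD 0)))
    Prod.fst false
  let bs := monsters.map (fun m => m.1)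
  let pr := monsters.foldl (fun (s : Int × List Int) m => (s.1 + m.2, s.2 ++ [s.1 + m.2])) (0, [0])
  (PySem.List.pyRange 0 N 1).foldl (fun res i =>
    res ++ [(PySem.List.pyGet? pr.2
      (solveAltCount bs ((PySem.List.pyGet? A i).getD 0) 0 (bs.length : Int))).getD 0]) []

-- ===== PRECONDITION & SPEC =====
-- Pre_ excludes inputs where N > len(A) or M > len(B) or M > len(C): A's nested indexing raises
-- IndexError on almost all of them, and on the few where A still returns (N ≤ 0, or no C[j] ever
-- touched) B's monster-building pass raises IndexError, so no value can be matched there.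
def Pre_solve (N : Int) (M : Int) (A : List Int) (B : List Int) (C : List Int) : Prop :=
  N ≤ (A.length : Int) ∧ M ≤ (B.length : Int) ∧ M ≤ (C.length : Int)
instance (N : Int) (M : Int) (A : List Int) (B : List Int) (C : List Int) : Decidable (Pre_solve N M A B C) := by unfold Pre_solve; infer_instance

def pvWitness_solve : Int × Int × List Int × List Int × List Int := (2, 2, [1, 3], [2, 1], [5, 7])

def Spec_solve (N : Int) (M : Int) (A : List Int) (B : List Int) (C : List Int) (out : List Int) : Prop := out = solve_alt N M A B C
instance (N : Int) (M : Int) (A : List Int) (B : List Int) (C : List Int) (out : List Int) : Decidable (Spec_solve N M A B C out) := by unfold Spec_solve; infer_instance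

-- ===== CLAIM (what is proved, stated in full; the proofs are below) =====
def Claim_equal_solve : Prop := ∀ (N : Int) (M : Int) (A : List Int) (B : List Int) (C : List Int), Dom_solve N M A B C → Pre_solve N M A B C → Spec_solve N M A B C (solve N M A B C)

-- ===== LEMMAS AND PROOFS =====

theorem pv_mid_bounds (lo hi : Int) (h : lo < hi) :
    lo ≤ PySem.Int.floordiv (lo + hi) 2 ∧ PySem.Int.floordiv (lo + hi) 2 < hi := by
  have he : PySem.Int.floordiv (lo + hi) 2 = Int.fdiv (lo + hi) 2 := rfl
  rw [he, Int.fdiv_eq_ediv]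
  omega

-- integer indexing at a nonnegative in-range index is plain getElem
theorem pv_pyGet_nat (xs : List Int) (k : Nat) (hk : k < xs.length) :
    (PySem.List.pyGet? xs (k : Int)).getD 0 = xs[k] := by
  simp [PySem.List.pyGet?, PySem.List.pyIdx?, hk]

-- appending zeros in a loop is replicate
theorem pv_zeros {α : Type} (l : List α) (acc : List Int) :
    l.foldl (fun a _ => a ++ [(0 : Int)]) acc = acc ++ List.replicate l.length 0 := by
  induction l generalizing acc with
  | nil => simp
  | cons x t ih => simp [ih, List.replicate_succ]

-- the inner monster loop updates exactly one cell
theorem pv_foldl_set {α : Type} (js : List α) (p : α → Prop) [DecidablePred p]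
    (g : α → Int) (tot : List Int) (k : Nat) (hk : k < tot.length) :
    js.foldl (fun t j => if p j then
        t.set k ((PySem.List.pyGet? t (k : Int)).getD 0 + g j) else t) tot
      = tot.set k (tot[k] + ((js.filter (fun j => decide (p j))).map g).sum) := by
  induction js generalizing tot with
  | nil => simp [List.set_getElem_self]
  | cons j t ih =>
    by_cases hj : p j
    · simp only [List.foldl_cons, hj, if_pos, List.filter_cons]
      rw [pv_pyGet_nat tot k hk, ih (tot.set k (tot[k] + g j)) (by simpa using hk)]
      rw [List.set_set]
      congr 1
      rw [List.getElem_set_self]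
      simp [add_assoc]
    · simp only [List.foldl_cons, hj, if_neg, not_false_iff, List.filter_cons]
      rw [ih tot hk]
      simp

-- characterisation of the takeWhile boundary on a sorted list
theorem pv_count_char (l : List Int) (x : Int) (h : l.Pairwise (· ≤ ·)) (k : Nat)
    (hk : k < l.length) :
    l[k] ≤ x ↔ k < (l.takeWhile (fun b => decide (b ≤ x))).length := by
  induction l generalizing k with
  | nil => simp at hk
  | cons a t ih =>
    obtain ⟨hat, hpt⟩ := List.pairwise_cons.mp h
    by_cases hax : a ≤ x
    · cases k with
      | zero => simp [hax]
      | succ k =>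
        simp only [List.getElem_cons_succ, List.takeWhile_cons, decide_eq_true hax, if_true]
        rw [ih hpt k (by simpa using hk)]
        simp
    · simp only [List.takeWhile_cons]
      rw [decide_eq_false hax]
      simp only [Bool.false_eq_true, if_false, List.length_nil]
      cases k with
      | zero => simpa using hax
      | succ k =>
        simp only [List.getElem_cons_succ]
        constructor
        · intro hle
          exact absurd (le_trans (hat _ (List.getElem_mem _)) hle) hax
        · omega

-- the binary search returns the takeWhile boundary
theorem pv_bs_count_go (bs : List Int) (x : Int) (h : bs.Pairwise (· ≤ ·)) (n : Nat) :
    ∀ (lo hi : Int), (hi - lo).toNat ≤ n → 0 ≤ lo →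
      lo ≤ ((bs.takeWhile (fun b => decide (b ≤ x))).length : Int) →
      ((bs.takeWhile (fun b => decide (b ≤ x))).length : Int) ≤ hi →
      hi ≤ (bs.length : Int) →
      solveAltCountGo bs x n lo hi = ((bs.takeWhile (fun b => decide (b ≤ x))).length : Int) := by
  induction n with
  | zero =>
    intro lo hi hfuel h0 hloT hThi hhil
    simp only [solveAltCountGo]
    omega
  | succ n ih =>
    intro lo hi hfuel h0 hloT hThi hhil
    simp only [solveAltCountGo]
    by_cases hlh : lo < hi
    · rw [if_pos hlh]
      obtain ⟨hm1, hm2⟩ := pv_mid_bounds lo hi hlh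
      set mid := PySem.Int.floordiv (lo + hi) 2 with hmid
      have h0m : 0 ≤ mid := le_trans h0 hm1
      have hml : mid < (bs.length : Int) := lt_of_lt_of_le hm2 hhil
      have hmn : mid.toNat < bs.length := by omega
      have hcast : (mid.toNat : Int) = mid := by omega
      have hget : (PySem.List.pyGet? bs mid).getD 0 = bs[mid.toNat] := by
        have hg := pv_pyGet_nat bs mid.toNat hmn
        rwa [hcast] at hg
      have hchar := pv_count_char bs x h mid.toNat hmn
      by_cases hle : (PySem.List.pyGet? bs mid).getD 0 ≤ x
      · rw [if_pos hle]
        have : mid.toNat < (bs.takeWhile (fun b => decide (b ≤ x))).length :=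
          hchar.mp (by rwa [hget] at hle)
        exact ih (mid + 1) hi (by omega) (by omega) (by omega) hThi hhil
      · rw [if_neg hle]
        have : ¬ mid.toNat < (bs.takeWhile (fun b => decide (b ≤ x))).length := by
          intro hc
          exact hle (by rw [hget]; exact hchar.mpr hc)
        exact ih lo mid (by omega) h0 hloT (by omega) (by omega)
    · rw [if_neg hlh]
      omega

theorem pv_bs_count (bs : List Int) (x : Int) (h : bs.Pairwise (· ≤ ·)) :
    solveAltCount bs x 0 (bs.length : Int)
      = ((bs.takeWhile (fun b => decide (b ≤ x))).length : Int) := by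
  have hTle : (bs.takeWhile (fun b => decide (b ≤ x))).length ≤ bs.length :=
    (List.takeWhile_prefix _).length_le
  exact pv_bs_count_go bs x h ((bs.length : Int) - 0).toNat 0 (bs.length : Int)
    le_rfl le_rfl (by omega) (by omega) le_rfl

-- on a sorted list, filter of a downward-closed predicate is takeWhile
theorem pv_filter_takeWhile (l : List (Int × Int)) (x : Int)
    (h : l.Pairwise (fun a b => a.1 ≤ b.1)) :
    l.filter (fun m => decide (m.1 ≤ x)) = l.takeWhile (fun m => decide (m.1 ≤ x)) := by
  induction l with
  | nil => rfl
  | cons a t ih =>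
    obtain ⟨hat, hpt⟩ := List.pairwise_cons.mp h
    by_cases hax : a.1 ≤ x
    · simp [hax, ih hpt]
    · simp only [List.filter_cons, List.takeWhile_cons]
      rw [decide_eq_false hax]
      simp only [Bool.false_eq_true, if_false]
      rw [List.filter_eq_nil_iff.mpr]
      intro m hm
      simp only [decide_eq_true_eq]
      intro hmx
      exact hax (le_trans (hat m hm) hmx)

-- the prefix-sum loop produces the list of partial sums
theorem pv_prefix (ms : List (Int × Int)) (t : Int) (pr : List Int) :
    (ms.foldl (fun (s : Int × List Int) m => (s.1 + m.2, s.2 ++ [s.1 + m.2])) (t, pr)).2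
      = pr ++ (List.range ms.length).map
          (fun k => t + ((ms.map (fun m => m.2)).take (k + 1)).sum) := by
  induction ms generalizing t pr with
  | nil => simp
  | cons m ms ih =>
    simp only [List.foldl_cons, ih, List.length_cons, List.range_succ_eq_map, List.map_cons,
      List.map_map, List.take_succ_cons, List.sum_cons]
    simp [Function.comp, add_assoc, List.append_assoc]

theorem pv_main (N : Int) (M : Int) (A : List Int) (B : List Int) (C : List Int)
    (hPre : Pre_solve N M A B C) : solve N M A B C = solve_alt N M A B C := by
  obtain ⟨hNA, hMB, hMC⟩ := hPre
  have hrange : PySem.List.pyRange 0 N 1 = (List.range N.toNat).map (fun (k : Nat) => (k : Int)) := by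
    rcases Int.lt_or_le N 0 with h | h
    · rw [PySem.List.pyRange_one_eq_nil (by omega)]
      rw [Int.toNat_of_nonpos (le_of_lt h)]
      simp
    · have h2 := PySem.List.pyRange_zero_natCast N.toNat
      rw [show ((N.toNat : Int)) = N by omega] at h2
      exact h2
  have hsolveA : solve N M A B C = (List.range N.toNat).map (fun (k : Nat) =>
      (((PySem.List.pyRange 0 M 1).filter
          (fun j => decide ((PySem.List.pyGet? A (k : Int)).getD 0 ≥ (PySem.List.pyGet? B j).getD 0))).map
        (fun j => (PySem.List.pyGet? C j).getD 0)).sum) := by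
    rw [solve]
    rw [pv_zeros, List.nil_append]
    have hlen : (PySem.List.pyRange 0 N 1).length = N.toNat := by rw [hrange]; simp
    rw [hlen, hrange, List.foldl_map]
    have houter : ∀ m : Nat, m ≤ N.toNat →
        (List.range m).foldl
          (fun tot (k : Nat) => (PySem.List.pyRange 0 M 1).foldl
            (fun t j => if (PySem.List.pyGet? A (k : Int)).getD 0 ≥ (PySem.List.pyGet? B j).getD 0 then
                t.set ((k : Int)).toNat ((PySem.List.pyGet? t (k : Int)).getD 0 + (PySem.List.pyGet? C j).getD 0)
              else t) tot)
          (List.replicate N.toNat 0)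
        = (List.range N.toNat).map (fun k => if k < m then
            (((PySem.List.pyRange 0 M 1).filter
                (fun j => decide ((PySem.List.pyGet? A (k : Int)).getD 0 ≥ (PySem.List.pyGet? B j).getD 0))).map
              (fun j => (PySem.List.pyGet? C j).getD 0)).sum
          else 0) := by
      intro m
      induction m with
      | zero =>
        intro _
        apply List.ext_getElem
        · simp
        · intro j h1 h2
          simp
      | succ m ih =>
        intro hm
        rw [List.range_succ, List.foldl_append, List.foldl_cons, List.foldl_nil, ih (by omega)]
        simp only [Int.toNat_natCast]
        rw [pv_foldl_set (PySem.List.pyRange 0 M 1)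
          (fun j => (PySem.List.pyGet? A (m : Int)).getD 0 ≥ (PySem.List.pyGet? B j).getD 0)
          (fun j => (PySem.List.pyGet? C j).getD 0) _ m (by simp; omega)]
        apply List.ext_getElem
        · simp
        · intro j h1 h2
          rw [List.getElem_set]
          by_cases hjm : m = j
          · subst hjm
            simp [List.getElem_map, List.getElem_range]
          · simp only [List.getElem_map, List.getElem_range]
            have : j < m ↔ j < m + 1 := by omega
            simp [hjm, this]
    rw [houter N.toNat le_rfl]
    apply List.map_congr_left
    intro k hk
    simp only [List.mem_range] at hk
    simp [hk]
  -- B side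
  have key : ∀ x : Int,
      (PySem.List.pyGet?
        ((PySem.List.sorted ((PySem.List.pyRange 0 M 1).map
            (fun j => ((PySem.List.pyGet? B j).getD 0, (PySem.List.pyGet? C j).getD 0)))
          Prod.fst false).foldl
            (fun (s : Int × List Int) m => (s.1 + m.2, s.2 ++ [s.1 + m.2])) (0, [0])).2
        (solveAltCount
          ((PySem.List.sorted ((PySem.List.pyRange 0 M 1).map
              (fun j => ((PySem.List.pyGet? B j).getD 0, (PySem.List.pyGet? C j).getD 0)))
            Prod.fst false).map (fun m => m.1)) x 0
          (((PySem.List.sorted ((PySem.List.pyRange 0 M 1).map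
              (fun j => ((PySem.List.pyGet? B j).getD 0, (PySem.List.pyGet? C j).getD 0)))
            Prod.fst false).map (fun m => m.1)).length : Int))).getD 0
      = (((PySem.List.pyRange 0 M 1).filter
            (fun j => decide (x ≥ (PySem.List.pyGet? B j).getD 0))).map
          (fun j => (PySem.List.pyGet? C j).getD 0)).sum := by
    intro x
    set g : Int → Int × Int :=
      fun j => ((PySem.List.pyGet? B j).getD 0, (PySem.List.pyGet? C j).getD 0) with hg
    set MON := PySem.List.sorted ((PySem.List.pyRange 0 M 1).map g) Prod.fst false with hMON
    have hperm : MON.Perm ((PySem.List.pyRange 0 M 1).map g) :=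
      PySem.List.sorted_perm _ _ _
    have hpwM : MON.Pairwise (fun a b => a.1 ≤ b.1) :=
      PySem.List.sorted_pairwise _ _
    have hpwBS : (MON.map (fun m => m.1)).Pairwise (· ≤ ·) := List.pairwise_map.mpr hpwM
    have htw : (MON.map (fun m => m.1)).takeWhile (fun b => decide (b ≤ x))
        = (MON.takeWhile (fun m => decide (m.1 ≤ x))).map (fun m => m.1) := by
      rw [List.takeWhile_map]
      rfl
    have hTle : (MON.takeWhile (fun m => decide (m.1 ≤ x))).length ≤ MON.length :=
      (List.takeWhile_prefix _).length_le
    have hcnt : solveAltCount (MON.map (fun m => m.1)) x 0 ((MON.map (fun m => m.1)).length : Int)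
        = ((MON.takeWhile (fun m => decide (m.1 ≤ x))).length : Int) := by
      have h2 := pv_bs_count (MON.map (fun m => m.1)) x hpwBS
      rw [htw] at h2
      simpa using h2
    have hpr : (MON.foldl (fun (s : Int × List Int) m => (s.1 + m.2, s.2 ++ [s.1 + m.2])) (0, [0])).2
        = (List.range (MON.length + 1)).map (fun k => ((MON.map (fun m => m.2)).take k).sum) := by
      rw [pv_prefix]
      rw [List.range_succ_eq_map]
      simp [List.map_map, Function.comp]
    rw [hcnt, hpr]
    have hTlt : (MON.takeWhile (fun m => decide (m.1 ≤ x))).length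
        < ((List.range (MON.length + 1)).map (fun k => ((MON.map (fun m => m.2)).take k).sum)).length := by
      simp
      omega
    rw [pv_pyGet_nat _ _ hTlt]
    rw [List.getElem_map, List.getElem_range]
    have htake : (MON.map (fun m => m.2)).take (MON.takeWhile (fun m => decide (m.1 ≤ x))).length
        = (MON.takeWhile (fun m => decide (m.1 ≤ x))).map (fun m => m.2) := by
      rw [← List.map_take]
      congr 1
      exact (List.prefix_iff_eq_take.mp (List.takeWhile_prefix _)).symm
    rw [htake, ← pv_filter_takeWhile MON x hpwM]
    rw [((hperm.filter (fun m => decide (m.1 ≤ x))).map (fun m => m.2)).sum_eq]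
    rw [List.filter_map, List.map_map]
    simp only [Function.comp_def]
    simp [hg, ge_iff_le]
  have hsolveB : solve_alt N M A B C = (List.range N.toNat).map (fun (k : Nat) =>
      (PySem.List.pyGet?
        ((PySem.List.sorted ((PySem.List.pyRange 0 M 1).map
            (fun j => ((PySem.List.pyGet? B j).getD 0, (PySem.List.pyGet? C j).getD 0)))
          Prod.fst false).foldl
            (fun (s : Int × List Int) m => (s.1 + m.2, s.2 ++ [s.1 + m.2])) (0, [0])).2
        (solveAltCount
          ((PySem.List.sorted ((PySem.List.pyRange 0 M 1).map
              (fun j => ((PySem.List.pyGet? B j).getD 0, (PySem.List.pyGet? C j).getD 0)))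
            Prod.fst false).map (fun m => m.1))
          ((PySem.List.pyGet? A (k : Int)).getD 0) 0
          (((PySem.List.sorted ((PySem.List.pyRange 0 M 1).map
              (fun j => ((PySem.List.pyGet? B j).getD 0, (PySem.List.pyGet? C j).getD 0)))
            Prod.fst false).map (fun m => m.1)).length : Int))).getD 0) := by
    rw [solve_alt]
    rw [PySem.List.foldl_append_singleton_eq_map, List.nil_append, hrange, List.map_map]
    rfl
  rw [hsolveA, hsolveB]
  apply List.map_congr_left
  intro k _
  exact (key ((PySem.List.pyGet? A (k : Int)).getD 0)).symm

-- ===== VERDICT (by name: the statement is the Claim_ definition above) =====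
theorem solve_spec : Claim_equal_solve := by
  intro N M A B C _ hPre
  unfold Spec_solve
  exact pv_main N M A B C hPre
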